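-- pv_equiv track=rewrite | github.com/nathwill/word-count | word-count.py | get_word_dict_at_depth
-- ===== SOURCE A (Python) =====
-- def get_word_dict_at_depth(word_list = [], char_depth = 1):
--     word_dict = {}
--     for word in word_list:
--         if len(word) < char_depth:
--             continue
--
--         s = word[0:char_depth]
--         if word_dict.get(s) == None:
--             word_dict[s] = 1
--         else:
--             word_dict[s] += 1
--
--     return word_dict
-- ===== SOURCE B (Python) =====
-- def get_word_dict_at_depth(word_list = [], char_depth = 1):
--     def go(ps):
--         if not ps:
--             return []
--         p = ps[0]
--         same = [q for q in ps if q == p]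
--         diff = [q for q in ps if q != p]
--         return [(p, len(same))] + go(diff)
--     prefixes = [w[0:char_depth] for w in word_list if len(w) >= char_depth]
--     return dict(go(prefixes))
-- ===== Notes on version B (the rewrite author's own statement) =====
-- stated objective: alternative
-- what changed: A counts incrementally with get()/=1/+=1 dict updates in one loop; B recursively partitions the prefix list: it takes the first prefix, splits the list into that group and the rest, emits (prefix, group size), and recurses on the rest, finally wrapping the pair list in dict().
import Mathlib
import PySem

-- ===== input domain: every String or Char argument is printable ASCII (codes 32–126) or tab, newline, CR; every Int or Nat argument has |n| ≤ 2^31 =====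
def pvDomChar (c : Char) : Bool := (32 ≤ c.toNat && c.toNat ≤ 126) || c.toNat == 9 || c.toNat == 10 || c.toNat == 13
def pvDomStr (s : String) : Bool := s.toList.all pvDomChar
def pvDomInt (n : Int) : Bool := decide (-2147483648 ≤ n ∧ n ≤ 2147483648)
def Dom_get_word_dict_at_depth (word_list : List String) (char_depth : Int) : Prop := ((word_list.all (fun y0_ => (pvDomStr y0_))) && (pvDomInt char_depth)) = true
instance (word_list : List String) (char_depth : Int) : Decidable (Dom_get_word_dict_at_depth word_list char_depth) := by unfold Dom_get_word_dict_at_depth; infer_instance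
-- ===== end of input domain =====

-- B replaces A's incremental dict-update loop with a recursive partition: take the first
-- prefix, split off its whole group, emit (prefix, group size), recurse on the remainder —
-- an alternative decomposition of the same cost class, not claimed faster.

-- ===== PORT A =====
-- Literal transliteration of A: one loop over word_list, skipping short words,
-- and updating the dict with get()==None / [s]=1 / [s]+=1 exactly as A does.
def get_word_dict_at_depth (word_list : List String) (char_depth : Int) : List (String × Int) :=
  (word_list.foldl
    (fun word_dict word =>
      if PySem.Str.len word < char_depth then word_dict
      else
        let s := PySem.Str.slice word (some 0) (some char_depth)
        match word_dict.get? s with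
        | none => word_dict.insert s 1
        | some v => word_dict.insert s (v + 1))
    (PySem.Dict.empty : PySem.Dict String Int)).items

-- ===== PORT B =====
-- Literal transliteration of Source B's helper go: empty → []; otherwise p = ps[0],
-- same/diff the two filter comprehensions, emit (p, len(same)) and recurse on diff.
def pvGo : List String → List (String × Int)
  | [] => []
  | p :: t =>
    (p, (((p :: t).filter (fun q => q == p)).length : Int))
      :: pvGo ((p :: t).filter (fun q => q != p))
termination_by ps => ps.length
decreasing_by
  simp only [List.filter_cons, bne_self_eq_false]
  exact Nat.lt_succ_of_le (List.length_filter_le _ _)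

-- Source B: prefixes comprehension, then dict(go(prefixes)) (dict(pairs) = fold of inserts).
def get_word_dict_at_depth_alt (word_list : List String) (char_depth : Int) : List (String × Int) :=
  let prefixes :=
    (word_list.filter (fun w => decide (char_depth ≤ PySem.Str.len w))).map
      (fun w => PySem.Str.slice w (some 0) (some char_depth))
  ((pvGo prefixes).foldl (fun d kv => d.insert kv.1 kv.2)
    (PySem.Dict.empty : PySem.Dict String Int)).items

-- ===== PRECONDITION & SPEC =====
def Spec_get_word_dict_at_depth (word_list : List String) (char_depth : Int) (out : List (String × Int)) : Prop := out = get_word_dict_at_depth_alt word_list char_depth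
instance (word_list : List String) (char_depth : Int) (out : List (String × Int)) : Decidable (Spec_get_word_dict_at_depth word_list char_depth out) := by unfold Spec_get_word_dict_at_depth; infer_instance

-- ===== CLAIM (what is proved, stated in full; the proofs are below) =====
def Claim_equal_get_word_dict_at_depth : Prop := ∀ (word_list : List String) (char_depth : Int), Dom_get_word_dict_at_depth word_list char_depth → Spec_get_word_dict_at_depth word_list char_depth (get_word_dict_at_depth word_list char_depth)

-- ===== LEMMAS AND PROOFS =====

-- A's loop body is exactly the Counter step 'd[s] = d.get(s, 0) + 1'.
theorem stepA_eq_counter_step (d : PySem.Dict String Int) (s : String) :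
    (match d.get? s with
     | none => d.insert s 1
     | some v => d.insert s (v + 1)) = d.insert s (d.getD s 0 + 1) := by
  cases h : d.get? s with
  | none => simp [PySem.Dict.getD_eq_get?_getD, h]
  | some v => simp [PySem.Dict.getD_eq_get?_getD, h]

-- A's dict is Counter(prefixes): fold over word_list = fold over the filtered+mapped list.
theorem dictA_eq_counter (word_list : List String) (char_depth : Int) :
    word_list.foldl
      (fun word_dict word =>
        if PySem.Str.len word < char_depth then word_dict
        else
          let s := PySem.Str.slice word (some 0) (some char_depth)
          match word_dict.get? s with
          | none => word_dict.insert s 1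
          | some v => word_dict.insert s (v + 1))
      (PySem.Dict.empty : PySem.Dict String Int)
    = PySem.Dict.counter
        ((word_list.filter (fun w => decide (char_depth ≤ PySem.Str.len w))).map
          (fun w => PySem.Str.slice w (some 0) (some char_depth))) := by
  rw [← PySem.Dict.foldl_insert_getD_add_one_eq_counter, List.foldl_map, List.foldl_filter]
  apply PySem.List.foldl_congr_mem
  intro d word _
  by_cases h : PySem.Str.len word < char_depth
  · rw [if_pos h, if_neg (by simpa using h)]
  · rw [if_neg h, if_pos (by simp at h ⊢; omega), stepA_eq_counter_step]

-- ordered dedup commutes with removing one value.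
theorem ofList_filter_ne (p : String) (t : List String) :
    PySem.Set.ofList (t.filter (fun q => q != p))
      = PySem.Set.discard (PySem.Set.ofList t) p := by
  induction t with
  | nil => rfl
  | cons x t ih =>
    by_cases hx : x = p
    · subst hx
      rw [List.filter_cons_of_neg (by simp), ih, PySem.Set.ofList_cons]
      simp [PySem.Set.discard, List.filter_filter]
    · rw [List.filter_cons_of_pos (by simp [hx]), PySem.Set.ofList_cons,
        PySem.Set.ofList_cons, ih]
      simp only [PySem.Set.discard, List.filter_cons, ne_eq, hx, not_false_eq_true,
        Bool.not_eq_eq_eq_not, Bool.not_true, beq_eq_false_iff_ne, if_pos]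
      rw [List.filter_filter, List.filter_filter]
      congr 1
      exact List.filter_congr (fun y _ => Bool.and_comm _ _)

-- go's result is the first-occurrence dedup of ps paired with the counts in ps.
theorem pvGo_eq (ps : List String) :
    pvGo ps = (PySem.Set.ofList ps).map (fun k => (k, (ps.count k : Int))) := by
  induction ps using pvGo.induct with
  | case1 => simp [pvGo]
  | case2 p t ih =>
    rw [pvGo, PySem.Set.ofList_cons, List.map_cons, ih, List.cons_eq_cons]
    refine ⟨?_, ?_⟩
    · have : List.count p (p :: t) = ((p :: t).filter (fun q => q == p)).length := by
        rw [List.count, List.countP_eq_length_filter]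
      rw [this]
    · have hd : (p :: t).filter (fun q => q != p) = t.filter (fun q => q != p) := by
        simp
      rw [hd, ofList_filter_ne]
      apply List.map_congr_left
      intro k hk
      have hkp : k ≠ p :=
        ((PySem.Set.mem_discard (s := PySem.Set.ofList t) (x := p) (y := k)).mp hk).2
      have h1 : (t.filter (fun q => q != p)).count k = t.count k :=
        List.count_filter (by simpa using hkp)
      rw [h1, List.count_cons]
      simp
      exact fun h => absurd h.symm hkp

-- dict(pairs) with distinct keys returns exactly the pair list.
theorem items_dict_of_pvGo (ps : List String) :
    ((pvGo ps).foldl (fun d kv => d.insert kv.1 kv.2)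
        (PySem.Dict.empty : PySem.Dict String Int)).items = pvGo ps := by
  have h := PySem.Dict.items_foldl_insert_fresh (pvGo ps) Prod.fst Prod.snd
    (PySem.Dict.empty : PySem.Dict String Int)
    (by intro a _; simp [PySem.Dict.contains_empty])
    (by rw [pvGo_eq, List.map_map]
        have hid : (Prod.fst ∘ fun k => (k, ((ps.count k : Nat) : Int))) = id := rfl
        rw [hid, List.map_id]
        exact PySem.Set.nodup_ofList ps)
  simpa using h

theorem get_word_dict_at_depth_eq (word_list : List String) (char_depth : Int) :
    get_word_dict_at_depth word_list char_depth = get_word_dict_at_depth_alt word_list char_depth := by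
  unfold get_word_dict_at_depth get_word_dict_at_depth_alt
  rw [dictA_eq_counter, PySem.Dict.items_counter, items_dict_of_pvGo, pvGo_eq]

-- ===== VERDICT (by name: the statement is the Claim_ definition above) =====
theorem get_word_dict_at_depth_spec : Claim_equal_get_word_dict_at_depth := by
  intro word_list char_depth _
  exact get_word_dict_at_depth_eq word_list char_depth
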